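-- pv_equiv track=rewrite | github.com/kdudhat/Data-staructure-Algorithm-python | Greedy Algorithm/maximum_number_prize.py | max_num_prize
-- ===== SOURCE A (Python) =====
-- def max_num_prize(n):
--     l = list()
--     i=1
--     while n>0:
--         if n>=i:
--             l.append(i)
--             n-=i
--             i+=1
--
--         else:
--             remove_element = i - n
--             l.remove(remove_element)
--             n+=remove_element
--
--     return l
-- ===== SOURCE B (Python) =====
-- def max_num_prize(n):
--     if n <= 0:
--         return []
--     # largest k with k*(k+1)//2 <= n, by binary search
--     lo, hi = 0, n
--     while lo < hi:
--         mid = (lo + hi + 1) // 2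
--         if mid * (mid + 1) // 2 <= n:
--             lo = mid
--         else:
--             hi = mid - 1
--     k = lo
--     r = n - k * (k + 1) // 2
--     l = [j for j in range(1, k + 1) if j != k + 1 - r]
--     if r > 0:
--         l.append(k + 1)
--     return l
-- ===== Notes on version B (the rewrite author's own statement) =====
-- stated objective: alternative
-- what changed: Replaces A's incremental greedy while-loop (append successive integers, then repair by removing one element) with a binary search for the largest k whose triangular number is at most n, followed by a direct construction of the prize list as a filtered range plus the absorbed last prize.
import Mathlib
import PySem

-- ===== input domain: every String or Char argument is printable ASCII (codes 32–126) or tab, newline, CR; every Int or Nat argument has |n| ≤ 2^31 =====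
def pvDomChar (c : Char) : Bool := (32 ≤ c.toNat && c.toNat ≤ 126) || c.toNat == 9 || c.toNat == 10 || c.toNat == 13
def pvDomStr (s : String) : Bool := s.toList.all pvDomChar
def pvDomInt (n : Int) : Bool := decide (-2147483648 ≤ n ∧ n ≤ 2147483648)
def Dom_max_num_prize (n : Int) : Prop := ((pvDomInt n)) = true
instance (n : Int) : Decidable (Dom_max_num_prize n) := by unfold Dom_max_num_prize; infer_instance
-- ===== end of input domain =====

-- B replaces A's incremental greedy while-loop by a binary search for the largest k with
-- k(k+1)/2 <= n plus a direct construction of the prize list (objective: alternative).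

-- ===== PORT A =====
-- the while-loop of A, state (n, i, l); the Nat fuel is only a totality guard (the
-- equivalence proof shows n.toNat + 2 steps always suffice, so it never runs out on
-- the top-level call).  On l.remove of an absent element Python raises ValueError —
-- that state is unreachable from the top-level call; [] stands for the raise.
def maxNumPrizeLoop : Nat → Int → Int → List Int → List Int
  | 0, _, _, l => l
  | fuel + 1, n, i, l =>
    if n > 0 then
      if n ≥ i then
        maxNumPrizeLoop fuel (n - i) (i + 1) (l ++ [i])
      else
        match PySem.List.remove? l (i - n) with
        | some l' => maxNumPrizeLoop fuel i i l'   -- n += remove_element makes n = i, same i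
        | none => []
    else l

def max_num_prize (n : Int) : List Int := maxNumPrizeLoop (n.toNat + 2) n 1 []

-- ===== PORT B =====
-- binary search of Source B: largest k in [lo, hi] with k*(k+1)//2 <= n; the Nat fuel is
-- only a totality guard ((hi - lo).toNat + 1 steps always suffice, proved below)
def bsLoop : Nat → Int → Int → Int → Int
  | 0, _, lo, _ => lo
  | fuel + 1, n, lo, hi =>
    if lo < hi then
      let mid := PySem.Int.floordiv (lo + hi + 1) 2
      if PySem.Int.floordiv (mid * (mid + 1)) 2 ≤ n then bsLoop fuel n mid hi
      else bsLoop fuel n lo (mid - 1)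
    else lo

def max_num_prize_alt (n : Int) : List Int :=
  if n ≤ 0 then []
  else
    let k := bsLoop (n.toNat + 1) n 0 n
    let r := n - PySem.Int.floordiv (k * (k + 1)) 2
    let l := (PySem.List.pyRange 1 (k + 1) 1).filter (fun j => j != k + 1 - r)
    if r > 0 then l ++ [k + 1] else l

-- ===== PRECONDITION & SPEC =====
def Spec_max_num_prize (n : Int) (out : List Int) : Prop := out = max_num_prize_alt n
instance (n : Int) (out : List Int) : Decidable (Spec_max_num_prize n out) := by unfold Spec_max_num_prize; infer_instance

-- ===== CLAIM (what is proved, stated in full; the proofs are below) =====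
def Claim_equal_max_num_prize : Prop := ∀ (n : Int), Dom_max_num_prize n → Spec_max_num_prize n (max_num_prize n)

-- ===== LEMMAS AND PROOFS =====

-- t k = k*(k+1)//2, the k-th triangular number
def tri (k : Int) : Int := PySem.Int.floordiv (k * (k + 1)) 2

lemma tri_two (k : Int) : 2 * tri k = k * (k + 1) := by
  unfold tri
  rw [PySem.Int.floordiv_eq_ediv_of_pos (by norm_num)]
  exact Int.mul_ediv_cancel' (Int.even_mul_succ_self k).two_dvd

lemma tri_succ (i : Int) : tri i = tri (i - 1) + i := by
  have h1 := tri_two i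
  have h2 := tri_two (i - 1)
  nlinarith

lemma tri_mono {a b : Int} (ha : 0 ≤ a) (h : a ≤ b) : tri a ≤ tri b := by
  have h1 := tri_two a
  have h2 := tri_two b
  nlinarith

-- the tail of B after the binary search
def buildB (k r : Int) : List Int :=
  let l := (PySem.List.pyRange 1 (k + 1) 1).filter (fun j => j != k + 1 - r)
  if r > 0 then l ++ [k + 1] else l

lemma bs_correct (n : Int) : ∀ fuel : Nat, ∀ lo hi : Int, (hi - lo).toNat < fuel →
    0 ≤ lo → lo ≤ hi → tri lo ≤ n → n < tri (hi + 1) →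
    0 ≤ bsLoop fuel n lo hi ∧ tri (bsLoop fuel n lo hi) ≤ n ∧ n < tri (bsLoop fuel n lo hi + 1) := by
  intro fuel
  induction fuel with
  | zero => intro lo hi hf; omega
  | succ fuel ih =>
    intro lo hi hf h0 hlh hlo hhi
    rw [bsLoop]
    by_cases hlt : lo < hi
    · rw [if_pos hlt]
      have hmid : PySem.Int.floordiv (lo + hi + 1) 2 = (lo + hi + 1) / 2 :=
        PySem.Int.floordiv_eq_ediv_of_pos (by norm_num)
      by_cases hle : PySem.Int.floordiv
          (PySem.Int.floordiv (lo + hi + 1) 2 * (PySem.Int.floordiv (lo + hi + 1) 2 + 1)) 2 ≤ n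
      · rw [if_pos hle]
        exact ih _ hi (by omega) (by omega) (by omega) hle hhi
      · rw [if_neg hle]
        have hlt' : n < tri (PySem.Int.floordiv (lo + hi + 1) 2 - 1 + 1) := by
          have h : PySem.Int.floordiv (lo + hi + 1) 2 - 1 + 1 =
              PySem.Int.floordiv (lo + hi + 1) 2 := by omega
          rw [h]
          exact lt_of_not_ge hle
        exact ih lo _ (by omega) h0 (by omega) hlo hlt'
    · rw [if_neg hlt]
      have : lo = hi := by omega
      subst this
      exact ⟨h0, hlo, hhi⟩

-- characterization of A's loop: starting from l = [1..i-1] it produces buildB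
lemma loopA_eq : ∀ fuel : Nat, ∀ n i k : Int, n.toNat + 2 ≤ fuel → 0 ≤ n → 1 ≤ i → i - 1 ≤ k →
    tri k ≤ n + tri (i - 1) → n + tri (i - 1) < tri (k + 1) →
    maxNumPrizeLoop fuel n i (PySem.List.pyRange 1 i 1) = buildB k (n + tri (i - 1) - tri k) := by
  intro fuel
  induction fuel with
  | zero => intro n i k hf; omega
  | succ fuel IH =>
    intro n i k hf hn hi hik h1 h2
    by_cases hn0 : n = 0
    · subst hn0
      rw [maxNumPrizeLoop]
      simp only [gt_iff_lt, lt_irrefl, if_false]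
      -- k = i - 1
      have hk : k = i - 1 := by
        by_contra hne
        have hik' : i ≤ k := by omega
        have := tri_mono (a := i) (b := k) (by omega) hik'
        have := tri_succ i
        omega
      subst hk
      unfold buildB
      simp only [zero_add] at *
      simp only [sub_self]
      have : (PySem.List.pyRange 1 (i - 1 + 1) 1).filter (fun j => j != i - 1 + 1 - 0) =
          PySem.List.pyRange 1 i 1 := by
        have : i - 1 + 1 = i := by omega
        rw [this]
        apply List.filter_eq_self.mpr
        intro a ha
        have := (PySem.List.mem_pyRange_one (x := a) (a := 1) (b := i)).mp ha
        simp only [bne_iff_ne, ne_eq]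
        omega
      rw [this]
      simp
    · -- n > 0
      have hnpos : 0 < n := by omega
      rw [maxNumPrizeLoop]
      simp only [hnpos, if_true]
      by_cases hni : n ≥ i
      · simp only [hni, if_true]
        rw [← PySem.List.pyRange_one_succ_right (by omega : (1:Int) ≤ i)]
        have hik' : i ≤ k := by
          by_contra hlt
          have hki : k + 1 ≤ i := by omega
          have := tri_mono (a := k + 1) (b := i) (by omega) hki
          have := tri_succ i
          omega
        have hti := tri_succ i
        have hrec := IH (n - i) (i + 1) k (by omega) (by omega) (by omega)
          (by omega) (by simp only [add_sub_cancel_right]; omega)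
          (by simp only [add_sub_cancel_right]; omega)
        rw [hrec]
        have : n - i + tri (i + 1 - 1) = n + tri (i - 1) := by
          simp only [add_sub_cancel_right]; omega
        rw [this]
      · -- 0 < n < i : remove i-n, then two more iterations finish
        simp only [hni, if_false]
        have hmem : (i - n) ∈ PySem.List.pyRange 1 i 1 := by
          rw [PySem.List.mem_pyRange_one]
          omega
        rw [PySem.List.remove?_eq_some_erase _ _ hmem]
        simp only []
        obtain ⟨fuel, rfl⟩ : ∃ f, fuel = f + 1 := ⟨fuel - 1, by omega⟩
        rw [maxNumPrizeLoop]
        have hipos : 0 < i := by omega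
        simp only [hipos, if_true, le_refl]
        obtain ⟨fuel, rfl⟩ : ∃ f, fuel = f + 1 := ⟨fuel - 1, by omega⟩
        rw [maxNumPrizeLoop]
        simp only [sub_self, gt_iff_lt, lt_irrefl, if_false]
        -- k = i - 1, r = n
        have hk : k = i - 1 := by
          by_contra hne
          have hik' : i ≤ k := by omega
          have h3 := tri_mono (a := i) (b := k) (by omega) hik'
          have h4 := tri_succ i
          omega
        subst hk
        unfold buildB
        have hki : i - 1 + 1 = i := by omega
        simp only [hki, add_sub_cancel_right]
        rw [if_pos hnpos]
        congr 1
        exact (PySem.List.nodup_pyRange_one 1 i).erase_eq_filter (i - n)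

-- ===== VERDICT (by name: the statement is the Claim_ definition above) =====
theorem max_num_prize_spec : Claim_equal_max_num_prize := by
  intro n _
  unfold Spec_max_num_prize max_num_prize max_num_prize_alt
  by_cases hle : n ≤ 0
  · simp only [hle, if_true]
    rw [maxNumPrizeLoop]
    split_ifs with h1 h2
    · omega
    · omega
    · rfl
  · simp only [hle, if_false]
    have hn1 : 1 ≤ n := by omega
    have htri0 : tri 0 = 0 := by have := tri_two 0; omega
    have hbs := bs_correct n (n.toNat + 1) 0 n (by omega) (le_refl 0) (by omega)
      (by rw [htri0]; omega)
      (by have := tri_two (n + 1); nlinarith)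
    have hpr : PySem.List.pyRange 1 1 1 = ([] : List Int) :=
      PySem.List.pyRange_one_eq_nil (by omega)
    have := loopA_eq (n.toNat + 2) n 1 (bsLoop (n.toNat + 1) n 0 n) (by omega) (by omega)
      (by omega) (by omega)
      (by simp only [sub_self, htri0, add_zero]; exact hbs.2.1)
      (by simp only [sub_self, htri0, add_zero]; exact hbs.2.2)
    rw [hpr] at this
    rw [this]
    unfold buildB tri
    simp only [sub_self, show PySem.Int.floordiv ((0:Int) * (0 + 1)) 2 = 0 from rfl, add_zero]
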